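-- pv_equiv track=rewrite | github.com/magoocas/life-of-a-burrb | src/rendering/shop.py | get_shop_tab_info
-- ===== SOURCE A (Python) =====
-- def get_shop_tab_info(
--     tab,
--     ABILITIES,
--     chips_collected,
--     ability_unlocked,
--     BIOME_ABILITIES,
--     biome_ability_unlocked,
--     berries_collected,
--     gems_collected,
--     snowflakes_collected,
--     mushrooms_collected,
-- ):
--     """Get the abilities list, currency count, currency name, and colors for a shop tab.
--
--     Returns a tuple:
--         (tab_abilities, currency_count, currency_name, cur_color,
--          bg_color, border_color, unlock_list, indices)
--     """
--     if tab == 0: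
--         return (
--             ABILITIES,
--             chips_collected,
--             "chips",
--             (255, 200, 50),
--             (40, 30, 60),
--             (100, 80, 160),
--             ability_unlocked,
--             list(range(len(ABILITIES))),
--         )
--     elif tab == 1:
--         items = [(n, c, k, d) for n, c, k, d, cur in BIOME_ABILITIES if cur == "berry"]
--         indices = [
--             i for i, (_, _, _, _, cur) in enumerate(BIOME_ABILITIES) if cur == "berry"
--         ]
--         return (
--             items,
--             berries_collected,
--             "berries",
--             (255, 100, 120),
--             (50, 25, 30),
--             (180, 80, 100),
--             biome_ability_unlocked,
--             indices,
--         )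
--     elif tab == 2:
--         items = [(n, c, k, d) for n, c, k, d, cur in BIOME_ABILITIES if cur == "gem"]
--         indices = [
--             i for i, (_, _, _, _, cur) in enumerate(BIOME_ABILITIES) if cur == "gem"
--         ]
--         return (
--             items,
--             gems_collected,
--             "gems",
--             (100, 220, 255),
--             (25, 40, 55),
--             (80, 150, 200),
--             biome_ability_unlocked,
--             indices,
--         )
--     elif tab == 3:
--         items = [
--             (n, c, k, d) for n, c, k, d, cur in BIOME_ABILITIES if cur == "snowflake"
--         ]
--         indices = [
--             i
--             for i, (_, _, _, _, cur) in enumerate(BIOME_ABILITIES)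
--             if cur == "snowflake"
--         ]
--         return (
--             items,
--             snowflakes_collected,
--             "snowflakes",
--             (200, 220, 255),
--             (30, 35, 55),
--             (100, 130, 200),
--             biome_ability_unlocked,
--             indices,
--         )
--     else:
--         items = [
--             (n, c, k, d) for n, c, k, d, cur in BIOME_ABILITIES if cur == "mushroom"
--         ]
--         indices = [
--             i
--             for i, (_, _, _, _, cur) in enumerate(BIOME_ABILITIES)
--             if cur == "mushroom"
--         ]
--         return (
--             items,
--             mushrooms_collected,
--             "mushrooms",
--             (100, 255, 150),
--             (25, 45, 30),
--             (80, 180, 100),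
--             biome_ability_unlocked,
--             indices,
--         )
-- ===== SOURCE B (Python) =====
-- def get_shop_tab_info(
--     tab,
--     ABILITIES,
--     chips_collected,
--     ability_unlocked,
--     BIOME_ABILITIES,
--     biome_ability_unlocked,
--     berries_collected,
--     gems_collected,
--     snowflakes_collected,
--     mushrooms_collected,
-- ):
--     """Get the abilities list, currency count, currency name, and colors for a shop tab."""
--     if tab == 0:
--         return (
--             ABILITIES,
--             chips_collected,
--             "chips",
--             (255, 200, 50),
--             (40, 30, 60),
--             (100, 80, 160),
--             ability_unlocked,
--             list(range(len(ABILITIES))),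
--         )
--     # one pass grouping every biome ability (with its index) by its currency
--     groups = {}
--     for i, (n, c, k, d, cur) in enumerate(BIOME_ABILITIES):
--         groups.setdefault(cur, []).append(((n, c, k, d), i))
--     config = {
--         1: ("berry", berries_collected, "berries", (255, 100, 120), (50, 25, 30), (180, 80, 100)),
--         2: ("gem", gems_collected, "gems", (100, 220, 255), (25, 40, 55), (80, 150, 200)),
--         3: ("snowflake", snowflakes_collected, "snowflakes", (200, 220, 255), (30, 35, 55), (100, 130, 200)),
--     }
--     cur, count, name, cur_color, bg_color, border_color = config.get(
--         tab, ("mushroom", mushrooms_collected, "mushrooms", (100, 255, 150), (25, 45, 30), (80, 180, 100))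
--     )
--     pairs = groups.get(cur, [])
--     return (
--         [p for p, _ in pairs],
--         count,
--         name,
--         cur_color,
--         bg_color,
--         border_color,
--         biome_ability_unlocked,
--         [i for _, i in pairs],
--     )
-- ===== Notes on version B (the rewrite author's own statement) =====
-- stated objective: alternative
-- what changed: Replaces the four per-tab pairs of filtering comprehensions and the if/elif colour chain by one enumerate pass that groups every biome ability (with its index) by its currency into a dict, plus a tab->config dict with a mushroom default; the answer is assembled from two dict lookups.
import Mathlib
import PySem

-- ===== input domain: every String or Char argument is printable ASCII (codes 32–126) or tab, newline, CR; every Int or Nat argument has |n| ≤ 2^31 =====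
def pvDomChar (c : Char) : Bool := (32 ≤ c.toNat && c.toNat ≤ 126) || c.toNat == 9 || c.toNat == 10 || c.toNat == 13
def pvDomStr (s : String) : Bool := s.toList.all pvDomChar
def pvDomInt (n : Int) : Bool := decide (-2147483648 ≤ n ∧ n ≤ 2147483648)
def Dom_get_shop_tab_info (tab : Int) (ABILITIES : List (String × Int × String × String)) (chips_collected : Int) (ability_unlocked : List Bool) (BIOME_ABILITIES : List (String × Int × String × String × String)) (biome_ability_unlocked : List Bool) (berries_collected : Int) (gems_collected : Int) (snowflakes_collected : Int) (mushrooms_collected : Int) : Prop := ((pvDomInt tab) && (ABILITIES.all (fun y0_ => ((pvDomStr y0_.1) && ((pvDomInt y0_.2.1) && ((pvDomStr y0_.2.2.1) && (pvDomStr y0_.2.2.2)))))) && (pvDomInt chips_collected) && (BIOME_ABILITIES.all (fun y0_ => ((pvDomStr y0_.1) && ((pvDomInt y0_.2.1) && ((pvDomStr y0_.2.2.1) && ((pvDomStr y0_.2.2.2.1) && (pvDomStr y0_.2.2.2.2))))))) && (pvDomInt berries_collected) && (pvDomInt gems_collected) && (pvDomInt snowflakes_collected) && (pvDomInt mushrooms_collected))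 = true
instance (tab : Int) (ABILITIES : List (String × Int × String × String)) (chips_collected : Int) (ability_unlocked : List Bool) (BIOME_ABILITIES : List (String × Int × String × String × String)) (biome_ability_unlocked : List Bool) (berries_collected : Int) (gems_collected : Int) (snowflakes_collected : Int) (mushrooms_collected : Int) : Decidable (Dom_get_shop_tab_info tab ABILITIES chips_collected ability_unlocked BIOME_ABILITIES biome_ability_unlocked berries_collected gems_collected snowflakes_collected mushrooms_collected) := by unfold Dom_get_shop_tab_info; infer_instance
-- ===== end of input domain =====

-- B replaces the per-tab filter comprehensions and colour chain by one currency-grouping pass and a tab-config lookup (alternative decomposition, same cost).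


-- ===== PORT A =====
def get_shop_tab_info (tab : Int) (ABILITIES : List (String × Int × String × String)) (chips_collected : Int) (ability_unlocked : List Bool) (BIOME_ABILITIES : List (String × Int × String × String × String)) (biome_ability_unlocked : List Bool) (berries_collected : Int) (gems_collected : Int) (snowflakes_collected : Int) (mushrooms_collected : Int) : (List (String × Int × String × String)) × Int × String × (Int × Int × Int) × (Int × Int × Int) × (Int × Int × Int) × List Bool × List Int :=
  if tab = 0 then
    (ABILITIES, chips_collected, "chips", (255, 200, 50), (40, 30, 60), (100, 80, 160),
      ability_unlocked, PySem.List.pyRange 0 (ABILITIES.length : Int) 1)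
  else if tab = 1 then
    let items := (BIOME_ABILITIES.filter (fun e => e.2.2.2.2 == "berry")).map (fun e => (e.1, e.2.1, e.2.2.1, e.2.2.2.1))
    let indices := ((PySem.List.enumerate BIOME_ABILITIES 0).filter (fun q => q.2.2.2.2.2 == "berry")).map (fun q => q.1)
    (items, berries_collected, "berries", (255, 100, 120), (50, 25, 30), (180, 80, 100),
      biome_ability_unlocked, indices)
  else if tab = 2 then
    let items := (BIOME_ABILITIES.filter (fun e => e.2.2.2.2 == "gem")).map (fun e => (e.1, e.2.1, e.2.2.1, e.2.2.2.1))
    let indices := ((PySem.List.enumerate BIOME_ABILITIES 0).filter (fun q => q.2.2.2.2.2 == "gem")).map (fun q => q.1)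
    (items, gems_collected, "gems", (100, 220, 255), (25, 40, 55), (80, 150, 200),
      biome_ability_unlocked, indices)
  else if tab = 3 then
    let items := (BIOME_ABILITIES.filter (fun e => e.2.2.2.2 == "snowflake")).map (fun e => (e.1, e.2.1, e.2.2.1, e.2.2.2.1))
    let indices := ((PySem.List.enumerate BIOME_ABILITIES 0).filter (fun q => q.2.2.2.2.2 == "snowflake")).map (fun q => q.1)
    (items, snowflakes_collected, "snowflakes", (200, 220, 255), (30, 35, 55), (100, 130, 200),
      biome_ability_unlocked, indices)
  else
    let items := (BIOME_ABILITIES.filter (fun e => e.2.2.2.2 == "mushroom")).map (fun e => (e.1, e.2.1, e.2.2.1, e.2.2.2.1))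
    let indices := ((PySem.List.enumerate BIOME_ABILITIES 0).filter (fun q => q.2.2.2.2.2 == "mushroom")).map (fun q => q.1)
    (items, mushrooms_collected, "mushrooms", (100, 255, 150), (25, 45, 30), (80, 180, 100),
      biome_ability_unlocked, indices)

-- ===== PORT B =====
-- the tab -> (currency key, count, currency name, colours) configuration dict
def pvShopConfig (berries gems snowflakes : Int) : PySem.Dict Int (String × Int × String × (Int × Int × Int) × (Int × Int × Int) × (Int × Int × Int)) :=
  PySem.Dict.ofList
    [(1, ("berry", berries, "berries", (255, 100, 120), (50, 25, 30), (180, 80, 100))),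
     (2, ("gem", gems, "gems", (100, 220, 255), (25, 40, 55), (80, 150, 200))),
     (3, ("snowflake", snowflakes, "snowflakes", (200, 220, 255), (30, 35, 55), (100, 130, 200)))]

-- one enumerate pass: group every biome ability (with its index) by its currency
def pvGroupBiome (l : List (String × Int × String × String × String)) : PySem.Dict String (List ((String × Int × String × String) × Int)) :=
  ((PySem.List.enumerate l 0).map (fun q => (q.2.2.2.2.2, ((q.2.1, q.2.2.1, q.2.2.2.1, q.2.2.2.2.1), q.1)))).foldl
    (fun d p => d.modify p.1 [] (· ++ [p.2])) PySem.Dict.empty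

def get_shop_tab_info_alt (tab : Int) (ABILITIES : List (String × Int × String × String)) (chips_collected : Int) (ability_unlocked : List Bool) (BIOME_ABILITIES : List (String × Int × String × String × String)) (biome_ability_unlocked : List Bool) (berries_collected : Int) (gems_collected : Int) (snowflakes_collected : Int) (mushrooms_collected : Int) : (List (String × Int × String × String)) × Int × String × (Int × Int × Int) × (Int × Int × Int) × (Int × Int × Int) × List Bool × List Int :=
  if tab = 0 then
    (ABILITIES, chips_collected, "chips", (255, 200, 50), (40, 30, 60), (100, 80, 160),
      ability_unlocked, PySem.List.pyRange 0 (ABILITIES.length : Int) 1)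
  else
    let groups := pvGroupBiome BIOME_ABILITIES
    let config := pvShopConfig berries_collected gems_collected snowflakes_collected
    let cfg := config.getD tab ("mushroom", mushrooms_collected, "mushrooms", (100, 255, 150), (25, 45, 30), (80, 180, 100))
    let pairs := groups.getD cfg.1 []
    (pairs.map (·.1), cfg.2.1, cfg.2.2.1, cfg.2.2.2.1, cfg.2.2.2.2.1, cfg.2.2.2.2.2,
      biome_ability_unlocked, pairs.map (·.2))

-- ===== PRECONDITION & SPEC =====
def Spec_get_shop_tab_info (tab : Int) (ABILITIES : List (String × Int × String × String)) (chips_collected : Int) (ability_unlocked : List Bool) (BIOME_ABILITIES : List (String × Int × String × String × String)) (biome_ability_unlocked : List Bool) (berries_collected : Int) (gems_collected : Int) (snowflakes_collected : Int) (mushrooms_collected : Int) (out : (List (String × Int × String × String)) × Int × String × (Int × Int × Int) × (Int × Int × Int) × (Int × Int × Int) × List Bool × List Int) : Prop := out = get_shop_tab_info_alt tab ABILITIES chips_collected ability_unlocked BIOME_ABILITIES biome_ability_unlocked berries_collected gems_collected snowflakes_collected mushrooms_collected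
instance (tab : Int) (ABILITIES : List (String × Int × String × String)) (chips_collected : Int) (ability_unlocked : List Bool) (BIOME_ABILITIES : List (String × Int × String × String × String)) (biome_ability_unlocked : List Bool) (berries_collected : Int) (gems_collected : Int) (snowflakes_collected : Int) (mushrooms_collected : Int) (out : (List (String × Int × String × String)) × Int × String × (Int × Int × Int) × (Int × Int × Int) × (Int × Int × Int) × List Bool × List Int) : Decidable (Spec_get_shop_tab_info tab ABILITIES chips_collected ability_unlocked BIOME_ABILITIES biome_ability_unlocked berries_collected gems_collected snowflakes_collected mushrooms_collected out) := by unfold Spec_get_shop_tab_info; haveI : DecidableEq ((Int × Int × Int) × (Int × Int × Int) × (Int × Int × Int) × List Bool × List Int) := instDecidableEqProd; infer_instance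

-- ===== CLAIM (what is proved, stated in full; the proofs are below) =====
def Claim_equal_get_shop_tab_info : Prop := ∀ (tab : Int) (ABILITIES : List (String × Int × String × String)) (chips_collected : Int) (ability_unlocked : List Bool) (BIOME_ABILITIES : List (String × Int × String × String × String)) (biome_ability_unlocked : List Bool) (berries_collected : Int) (gems_collected : Int) (snowflakes_collected : Int) (mushrooms_collected : Int), Dom_get_shop_tab_info tab ABILITIES chips_collected ability_unlocked BIOME_ABILITIES biome_ability_unlocked berries_collected gems_collected snowflakes_collected mushrooms_collected → Spec_get_shop_tab_info tab ABILITIES chips_collected ability_unlocked BIOME_ABILITIES biome_ability_unlocked berries_collected gems_collected snowflakes_collected mushrooms_collected (get_shop_tab_info tab ABILITIES chips_collected ability_unlocked BIOME_ABILITIES biome_ability_unlocked berries_collected gems_collected snowflakes_collected mushrooms_collected)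

-- ===== LEMMAS AND PROOFS =====

lemma pvEnumFilterMap (l : List (String × Int × String × String × String)) (s : Int) (cur : String) :
    ((PySem.List.enumerate l s).filter (fun q => q.2.2.2.2.2 == cur)).map (fun q => (q.2.1, q.2.2.1, q.2.2.2.1, q.2.2.2.2.1))
      = (l.filter (fun e => e.2.2.2.2 == cur)).map (fun e => (e.1, e.2.1, e.2.2.1, e.2.2.2.1)) := by
  induction l generalizing s with
  | nil => simp [PySem.List.enumerate_nil]
  | cons x xs ih =>
    simp only [PySem.List.enumerate_cons, List.filter_cons]
    by_cases h : x.2.2.2.2 == cur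
    · simp [h, ih]
    · simp [h, ih]

lemma pvPairsSpec (l : List (String × Int × String × String × String)) (cur : String) :
    (pvGroupBiome l).getD cur []
      = ((PySem.List.enumerate l 0).filter (fun q => q.2.2.2.2.2 == cur)).map
          (fun q => ((q.2.1, q.2.2.1, q.2.2.2.1, q.2.2.2.2.1), q.1)) := by
  unfold pvGroupBiome
  rw [PySem.Dict.getD_foldl_modify_append]
  simp [List.filter_map, List.map_map, Function.comp_def]

lemma pvBranchEq (l : List (String × Int × String × String × String)) (cur : String) :
    ((pvGroupBiome l).getD cur []).map (·.1)
        = (l.filter (fun e => e.2.2.2.2 == cur)).map (fun e => (e.1, e.2.1, e.2.2.1, e.2.2.2.1))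
    ∧ ((pvGroupBiome l).getD cur []).map (·.2)
        = ((PySem.List.enumerate l 0).filter (fun q => q.2.2.2.2.2 == cur)).map (fun q => q.1) := by
  rw [pvPairsSpec]
  constructor
  · rw [List.map_map]
    exact pvEnumFilterMap l 0 cur
  · rw [List.map_map]
    rfl

-- ===== VERDICT (by name: the statement is the Claim_ definition above) =====
lemma pvConfigContains (b g sn : Int) (t : Int) :
    (pvShopConfig b g sn).contains t = (t == 1 || t == 2 || t == 3) := by
  by_cases h1 : t = 1
  · subst h1; rfl
  by_cases h2 : t = 2
  · subst h2; rfl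
  by_cases h3 : t = 3
  · subst h3; rfl
  · rw [show (pvShopConfig b g sn).contains t = ((1 : Int) == t || ((2 : Int) == t || ((3 : Int) == t || false))) from rfl]
    have e1 : ((1 : Int) == t) = false := by simp [Ne.symm h1]
    have e2 : ((2 : Int) == t) = false := by simp [Ne.symm h2]
    have e3 : ((3 : Int) == t) = false := by simp [Ne.symm h3]
    have f1 : (t == (1 : Int)) = false := by simp [h1]
    have f2 : (t == (2 : Int)) = false := by simp [h2]
    have f3 : (t == (3 : Int)) = false := by simp [h3]
    rw [e1, e2, e3, f1, f2, f3]
    rfl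

theorem get_shop_tab_info_spec : Claim_equal_get_shop_tab_info := by
  intro tab ABILITIES chips_collected ability_unlocked BIOME_ABILITIES biome_ability_unlocked
    berries_collected gems_collected snowflakes_collected mushrooms_collected _hD
  unfold Spec_get_shop_tab_info get_shop_tab_info get_shop_tab_info_alt
  by_cases h0 : tab = 0
  · simp [h0]
  by_cases h1 : tab = 1
  · subst h1
    simp only [if_neg h0]
    have hc : (pvShopConfig berries_collected gems_collected snowflakes_collected).getD 1
        ("mushroom", mushrooms_collected, "mushrooms", (100, 255, 150), (25, 45, 30), (80, 180, 100))
        = ("berry", berries_collected, "berries", (255, 100, 120), (50, 25, 30), (180, 80, 100)) := rfl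
    rw [hc]
    obtain ⟨hi, hx⟩ := pvBranchEq BIOME_ABILITIES "berry"
    exact Prod.ext hi.symm (by simp [hx])
  by_cases h2 : tab = 2
  · subst h2
    simp only [if_neg h0, if_neg h1]
    have hc : (pvShopConfig berries_collected gems_collected snowflakes_collected).getD 2
        ("mushroom", mushrooms_collected, "mushrooms", (100, 255, 150), (25, 45, 30), (80, 180, 100))
        = ("gem", gems_collected, "gems", (100, 220, 255), (25, 40, 55), (80, 150, 200)) := rfl
    rw [hc]
    obtain ⟨hi, hx⟩ := pvBranchEq BIOME_ABILITIES "gem"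
    exact Prod.ext hi.symm (by simp [hx])
  by_cases h3 : tab = 3
  · subst h3
    simp only [if_neg h0, if_neg h1, if_neg h2]
    have hc : (pvShopConfig berries_collected gems_collected snowflakes_collected).getD 3
        ("mushroom", mushrooms_collected, "mushrooms", (100, 255, 150), (25, 45, 30), (80, 180, 100))
        = ("snowflake", snowflakes_collected, "snowflakes", (200, 220, 255), (30, 35, 55), (100, 130, 200)) := rfl
    rw [hc]
    obtain ⟨hi, hx⟩ := pvBranchEq BIOME_ABILITIES "snowflake"
    exact Prod.ext hi.symm (by simp [hx])
  · simp only [if_neg h0, if_neg h1, if_neg h2, if_neg h3]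
    have hc : (pvShopConfig berries_collected gems_collected snowflakes_collected).getD tab
        ("mushroom", mushrooms_collected, "mushrooms", (100, 255, 150), (25, 45, 30), (80, 180, 100))
        = ("mushroom", mushrooms_collected, "mushrooms", (100, 255, 150), (25, 45, 30), (80, 180, 100)) := by
      apply PySem.Dict.getD_of_not_contains
      rw [pvConfigContains]
      simp [h1, h2, h3]
    rw [hc]
    obtain ⟨hi, hx⟩ := pvBranchEq BIOME_ABILITIES "mushroom"
    exact Prod.ext hi.symm (by simp [hx])
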